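-- pv_equiv track=rewrite | github.com/antoine1242/AdventOfCode | 2020/Day12/problem2.py | move_ship
-- ===== SOURCE A (Python) =====
-- def move_ship(curr_waypoint, curr_x, curr_y, command, number):
--     if command == "E":
--         curr_waypoint = (curr_waypoint[0] + number, curr_waypoint[1])
--     elif command == "N":
--         curr_waypoint = (curr_waypoint[0], curr_waypoint[1] + number)
--     elif command == "S":
--         curr_waypoint = (curr_waypoint[0], curr_waypoint[1] - number)
--     elif command == "W":
--         curr_waypoint = (curr_waypoint[0] - number, curr_waypoint[1])
--
--     elif command == "R":
--         turns = number // 90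
--
--         for i in range(turns):
--             curr_waypoint = (curr_waypoint[1], -curr_waypoint[0])
--
--     elif command == "L":
--         turns = number // 90
--
--         for i in range(turns):
--             curr_waypoint = (-curr_waypoint[1], curr_waypoint[0])
--
--
--     elif command == "F":
--         curr_x += curr_waypoint[0] * number
--         curr_y += curr_waypoint[1] * number
--
--     return curr_waypoint, curr_x, curr_y
-- ===== SOURCE B (Python) =====
-- def move_ship(curr_waypoint, curr_x, curr_y, command, number):
--     x, y = curr_waypoint
--     deltas = {"E": (1, 0), "N": (0, 1), "S": (0, -1), "W": (-1, 0)}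
--     if command in deltas:
--         dx, dy = deltas[command]
--         return (x + dx * number, y + dy * number), curr_x, curr_y
--     if command == "R" or command == "L":
--         t = (number // 90) % 4          # quarter-turns, clockwise for R
--         if command == "L":
--             t = -t % 4
--         cos = (1, 0, -1, 0)[t]          # cos/sin of -t * 90 degrees
--         sin = (0, -1, 0, 1)[t]
--         return (x * cos - y * sin, x * sin + y * cos), curr_x, curr_y
--     if command == "F":
--         return (x, y), curr_x + x * number, curr_y + y * number
--     return curr_waypoint, curr_x, curr_y
-- ===== Notes on version B (the rewrite author's own statement) =====
-- stated objective: simpler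
-- what changed: E/N/S/W become one generic translation via a direction-delta dict, and R/L rotations are computed in closed form from a cos/sin quarter-turn table indexed by (number//90)%4 instead of iterating one quarter-turn per 90 degrees.
-- intended difference: On R or L commands with a negative angle not a multiple of 360 and a nonzero waypoint, A leaves the waypoint unchanged because range() over the negative turn count is empty, while B rotates by the angle modulo 360, which is the intended rotation. — e.g. on move_ship((1, 0), 0, 0, "R", -90): A returns ((1, 0), 0, 0), B returns ((0, 1), 0, 0)
import Mathlib
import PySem

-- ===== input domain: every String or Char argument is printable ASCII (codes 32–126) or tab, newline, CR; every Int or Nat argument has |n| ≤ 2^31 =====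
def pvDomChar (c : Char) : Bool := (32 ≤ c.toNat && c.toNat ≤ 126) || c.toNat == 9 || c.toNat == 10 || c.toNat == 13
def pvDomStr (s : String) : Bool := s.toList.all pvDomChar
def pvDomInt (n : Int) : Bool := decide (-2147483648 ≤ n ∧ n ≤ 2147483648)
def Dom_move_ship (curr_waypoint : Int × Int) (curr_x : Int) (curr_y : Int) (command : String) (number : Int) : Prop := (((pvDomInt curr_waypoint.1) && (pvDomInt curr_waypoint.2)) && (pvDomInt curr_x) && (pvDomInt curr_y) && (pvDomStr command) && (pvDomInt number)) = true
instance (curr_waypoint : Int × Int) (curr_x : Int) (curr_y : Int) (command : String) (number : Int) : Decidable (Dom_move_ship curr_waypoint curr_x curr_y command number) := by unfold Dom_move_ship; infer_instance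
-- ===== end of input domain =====

set_option maxRecDepth 2000

-- B dispatches E/N/S/W through a delta table and computes R/L rotations in closed form from a
-- cos/sin quarter-turn table (objective: simpler); on negative R/L angles B rotates where A no-ops.


-- ===== PORT A =====
def move_ship (curr_waypoint : Int × Int) (curr_x : Int) (curr_y : Int) (command : String) (number : Int) : (Int × Int) × Int × Int :=
  if command = "E" then ((curr_waypoint.1 + number, curr_waypoint.2), curr_x, curr_y)
  else if command = "N" then ((curr_waypoint.1, curr_waypoint.2 + number), curr_x, curr_y)
  else if command = "S" then ((curr_waypoint.1, curr_waypoint.2 - number), curr_x, curr_y)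
  else if command = "W" then ((curr_waypoint.1 - number, curr_waypoint.2), curr_x, curr_y)
  else if command = "R" then
    let turns := PySem.Int.floordiv number 90
    ((PySem.List.pyRange 0 turns 1).foldl (fun p _ => (p.2, -p.1)) curr_waypoint, curr_x, curr_y)
  else if command = "L" then
    let turns := PySem.Int.floordiv number 90
    ((PySem.List.pyRange 0 turns 1).foldl (fun p _ => (-p.2, p.1)) curr_waypoint, curr_x, curr_y)
  else if command = "F" then (curr_waypoint, curr_x + curr_waypoint.1 * number, curr_y + curr_waypoint.2 * number)
  else (curr_waypoint, curr_x, curr_y)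

-- ===== PORT B =====
-- delta table for the four translation commands (the Python dict literal)
def pvDeltas : PySem.Dict String (Int × Int) :=
  PySem.Dict.ofList [("E", (1, 0)), ("N", (0, 1)), ("S", (0, -1)), ("W", (-1, 0))]

def move_ship_alt (curr_waypoint : Int × Int) (curr_x : Int) (curr_y : Int) (command : String) (number : Int) : (Int × Int) × Int × Int :=
  let x := curr_waypoint.1
  let y := curr_waypoint.2
  match PySem.Dict.get? pvDeltas command with
  | some d => ((x + d.1 * number, y + d.2 * number), curr_x, curr_y)
  | none =>
    if command = "R" ∨ command = "L" then
      let t := PySem.Int.mod (PySem.Int.floordiv number 90) 4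
      let t' := if command = "L" then PySem.Int.mod (-t) 4 else t
      -- tuple indexing (1,0,-1,0)[t']: t' ∈ [0,3] so pyGet? is always some; the getD default is unreachable
      let cos := (PySem.List.pyGet? ([1, 0, -1, 0] : List Int) t').getD 0
      let sin := (PySem.List.pyGet? ([0, -1, 0, 1] : List Int) t').getD 0
      ((x * cos - y * sin, x * sin + y * cos), curr_x, curr_y)
    else if command = "F" then ((x, y), curr_x + x * number, curr_y + y * number)
    else (curr_waypoint, curr_x, curr_y)

-- ===== PRECONDITION & SPEC =====
-- On R/L with a negative angle that is not a multiple of 360 and a nonzero waypoint, A leaves the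
-- waypoint unchanged (range over a negative count is empty) while B rotates by the angle mod 360,
-- which is the intended rotation.
def D_move_ship (curr_waypoint : Int × Int) (curr_x : Int) (curr_y : Int) (command : String) (number : Int) : Prop :=
  (command = "R" ∨ command = "L") ∧ number < 0 ∧
    PySem.Int.mod (PySem.Int.floordiv number 90) 4 ≠ 0 ∧ curr_waypoint ≠ (0, 0)
instance (curr_waypoint : Int × Int) (curr_x : Int) (curr_y : Int) (command : String) (number : Int) : Decidable (D_move_ship curr_waypoint curr_x curr_y command number) := by unfold D_move_ship; infer_instance

def Spec_move_ship (curr_waypoint : Int × Int) (curr_x : Int) (curr_y : Int) (command : String) (number : Int) (out : (Int × Int) × Int × Int) : Prop := ¬ D_move_ship curr_waypoint curr_x curr_y command number → out = move_ship_alt curr_waypoint curr_x curr_y command number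
instance (curr_waypoint : Int × Int) (curr_x : Int) (curr_y : Int) (command : String) (number : Int) (out : (Int × Int) × Int × Int) : Decidable (Spec_move_ship curr_waypoint curr_x curr_y command number out) := by unfold Spec_move_ship; infer_instance

def pvDiffWitness_move_ship : (Int × Int) × Int × Int × String × Int := ((1, 0), 0, 0, "R", -90)
def pvDiffWitnessOut_move_ship : ((Int × Int) × Int × Int) × ((Int × Int) × Int × Int) := (((1, 0), 0, 0), ((0, 1), 0, 0))

-- ===== CLAIM (what is proved, stated in full; the proofs are below) =====
def Claim_unchanged_move_ship : Prop := ∀ (curr_waypoint : Int × Int) (curr_x : Int) (curr_y : Int) (command : String) (number : Int), Dom_move_ship curr_waypoint curr_x curr_y command number → Spec_move_ship curr_waypoint curr_x curr_y command number (move_ship curr_waypoint curr_x curr_y command number)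
def Claim_changed_move_ship : Prop := Dom_move_ship (pvDiffWitness_move_ship.1) (pvDiffWitness_move_ship.2.1) (pvDiffWitness_move_ship.2.2.1) (pvDiffWitness_move_ship.2.2.2.1) (pvDiffWitness_move_ship.2.2.2.2) ∧ D_move_ship (pvDiffWitness_move_ship.1) (pvDiffWitness_move_ship.2.1) (pvDiffWitness_move_ship.2.2.1) (pvDiffWitness_move_ship.2.2.2.1) (pvDiffWitness_move_ship.2.2.2.2) ∧ move_ship (pvDiffWitness_move_ship.1) (pvDiffWitness_move_ship.2.1) (pvDiffWitness_move_ship.2.2.1) (pvDiffWitness_move_ship.2.2.2.1) (pvDiffWitness_move_ship.2.2.2.2) = pvDiffWitnessOut_move_ship.1 ∧ move_ship_alt (pvDiffWitness_move_ship.1) (pvDiffWitness_move_ship.2.1) (pvDiffWitness_move_ship.2.2.1) (pvDiffWitness_move_ship.2.2.2.1) (pvDiffWitness_move_ship.2.2.2.2) = pvDiffWitnessOut_move_ship.2 ∧ pvDiffWitnessOut_move_ship.1 ≠ pvDiffWitnessOut_move_ship.2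
def Claim_exact_move_ship : Prop := ∀ (curr_waypoint : Int × Int) (curr_x : Int) (curr_y : Int) (command : String) (number : Int), Dom_move_ship curr_waypoint curr_x curr_y command number → D_move_ship curr_waypoint curr_x curr_y command number → move_ship curr_waypoint curr_x curr_y command number ≠ move_ship_alt curr_waypoint curr_x curr_y command number

-- ===== LEMMAS AND PROOFS =====
-- clockwise quarter turn
def rotR (p : Int × Int) : Int × Int := (p.2, -p.1)

theorem foldl_const_iterate {α β : Type} (f : α → α) (l : List β) (a : α) :
    l.foldl (fun p _ => f p) a = f^[l.length] a := by
  induction l generalizing a with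
  | nil => rfl
  | cons b l ih => simp [List.foldl, ih, Function.iterate_succ_apply]

theorem rotR_four (p : Int × Int) : rotR^[4] p = p := by
  simp [rotR, Function.iterate_succ_apply]

theorem rotR_zero (n : Nat) : rotR^[n] ((0 : Int), (0 : Int)) = ((0 : Int), (0 : Int)) := by
  induction n with
  | zero => rfl
  | succ k ih => rw [Function.iterate_succ_apply', ih]; rfl

theorem rotR_iterate_mod (n : Nat) (p : Int × Int) : rotR^[n] p = rotR^[n % 4] p := by
  induction n using Nat.strong_induction_on with
  | _ n ih =>
    by_cases h : n < 4
    · rw [Nat.mod_eq_of_lt h]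
    · have hn : n - 4 + 4 = n := by omega
      calc rotR^[n] p = rotR^[n - 4 + 4] p := by rw [hn]
        _ = rotR^[n - 4] (rotR^[4] p) := Function.iterate_add_apply _ _ _ _
        _ = rotR^[n - 4] p := by rw [rotR_four]
        _ = rotR^[(n - 4) % 4] p := ih (n - 4) (by omega)
        _ = rotR^[n % 4] p := by congr 1; omega

theorem rotL_iter (n : Nat) (p : Int × Int) :
    (fun q : Int × Int => (-q.2, q.1))^[n] p = rotR^[3 * n] p := by
  induction n generalizing p with
  | zero => rfl
  | succ k ih =>
    rw [Function.iterate_succ_apply, ih, show 3 * (k + 1) = 3 * k + 3 by ring,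
      Function.iterate_add_apply]
    congr 1
    simp [rotR, Function.iterate_succ_apply]

-- B's table expression is rotR iterated t' times, for t' ∈ [0,3]
theorem table_eq_rotR (x y t' : Int) (h0 : 0 ≤ t') (h4 : t' < 4) :
    ((x * ((PySem.List.pyGet? ([1, 0, -1, 0] : List Int) t').getD 0)
        - y * ((PySem.List.pyGet? ([0, -1, 0, 1] : List Int) t').getD 0),
      x * ((PySem.List.pyGet? ([0, -1, 0, 1] : List Int) t').getD 0)
        + y * ((PySem.List.pyGet? ([1, 0, -1, 0] : List Int) t').getD 0)) : Int × Int)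
      = rotR^[t'.toNat] (x, y) := by
  interval_cases t' <;>
    simp [PySem.List.pyGet?, PySem.List.pyIdx?, rotR, Function.iterate_succ_apply]

theorem move_ship_spec : Claim_unchanged_move_ship := by
  intro wp cx cy command number _ hnD
  unfold move_ship move_ship_alt
  by_cases hE : command = "E"
  · subst hE
    rw [show PySem.Dict.get? pvDeltas "E" = some (1, 0) from by decide]
    simp
  by_cases hN : command = "N"
  · subst hN
    rw [show PySem.Dict.get? pvDeltas "N" = some (0, 1) from by decide]
    simp
  by_cases hS : command = "S"
  · subst hS
    rw [show PySem.Dict.get? pvDeltas "S" = some (0, -1) from by decide]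
    simp
    ring
  by_cases hW : command = "W"
  · subst hW
    rw [show PySem.Dict.get? pvDeltas "W" = some (-1, 0) from by decide]
    simp
    ring
  have hd : pvDeltas = PySem.Dict.mk [("E", (1, 0)), ("N", (0, 1)), ("S", (0, -1)), ("W", (-1, 0))] := by decide
  have e1 : (("E" : String) == command) = false := by rw [beq_eq_false_iff_ne]; exact fun h => hE h.symm
  have e2 : (("N" : String) == command) = false := by rw [beq_eq_false_iff_ne]; exact fun h => hN h.symm
  have e3 : (("S" : String) == command) = false := by rw [beq_eq_false_iff_ne]; exact fun h => hS h.symm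
  have e4 : (("W" : String) == command) = false := by rw [beq_eq_false_iff_ne]; exact fun h => hW h.symm
  have hget : PySem.Dict.get? pvDeltas command = none := by
    simp [hd, e1, e2, e3, e4, PySem.Dict.get?]
  by_cases hR : command = "R"
  · subst hR
    simp only [hget, String.reduceEq, if_false, or_false, ite_true]
    set turns := PySem.Int.floordiv number 90 with hturns
    have h0 : (0:Int) ≤ PySem.Int.mod turns 4 := PySem.Int.mod_nonneg _ (by norm_num : (0:Int) < 4)
    have h4 : PySem.Int.mod turns 4 < 4 := PySem.Int.mod_lt _ (by norm_num : (0:Int) < 4)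
    rw [show (fun (p : Int × Int) (_ : Int) => (p.2, -p.1)) = (fun p _ => rotR p) from rfl,
      foldl_const_iterate rotR _ wp, PySem.List.length_pyRange_one]
    rw [show (wp : Int × Int) = (wp.1, wp.2) from rfl] at *
    rw [table_eq_rotR _ _ _ h0 h4]
    unfold D_move_ship at hnD
    by_cases hneg : number < 0
    · -- A does no turns; ¬D forces mod = 0 or waypoint (0,0)
      have hturns_neg : turns < 0 := by
        rw [hturns]; rw [show (number:Int) < 0 ↔ number ≤ -1 by omega] at hneg
        have := PySem.Int.floordiv_lt_iff_lt_mul (a:=number) (b:=90) (q:=0) (by norm_num)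
        omega
      rw [show turns - 0 = turns by ring, Int.toNat_of_nonpos (by omega)]
      by_cases hm : PySem.Int.mod turns 4 = 0
      · rw [hm]; rfl
      · have hwp0 : wp = ((0 : Int), (0 : Int)) := by
          by_contra hc
          exact hnD ⟨Or.inl rfl, hneg, hm, hc⟩
        have hx : wp.1 = 0 := by rw [hwp0]
        have hy : wp.2 = 0 := by rw [hwp0]
        rw [hx, hy]
        exact congrArg (fun z => (z, cx, cy)) (rotR_zero _).symm
    · -- number ≥ 0: turns ≥ 0 and mod agrees with Nat %
      have hturns_nn : 0 ≤ turns := by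
        rw [hturns]
        have := PySem.Int.le_floordiv_iff_mul_le (a:=number) (b:=90) (q:=0) (by norm_num)
        omega
      rw [show turns - 0 = turns by ring]
      have hmod : PySem.Int.mod turns 4 = ((turns.toNat % 4 : Nat) : Int) := by
        rw [PySem.Int.mod_eq_emod_of_pos (by norm_num)]
        omega
      rw [hmod, Int.toNat_natCast, rotR_iterate_mod]
  by_cases hL : command = "L"
  · subst hL
    simp only [hget, String.reduceEq, if_false, or_true, ite_true]
    set turns := PySem.Int.floordiv number 90 with hturns
    set t := PySem.Int.mod turns 4 with ht
    have h0 : (0:Int) ≤ t := PySem.Int.mod_nonneg _ (by norm_num : (0:Int) < 4)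
    have h4 : t < 4 := PySem.Int.mod_lt _ (by norm_num : (0:Int) < 4)
    have h0' : (0:Int) ≤ PySem.Int.mod (-t) 4 := PySem.Int.mod_nonneg _ (by norm_num : (0:Int) < 4)
    have h4' : PySem.Int.mod (-t) 4 < 4 := PySem.Int.mod_lt _ (by norm_num : (0:Int) < 4)
    rw [show (fun (p : Int × Int) (_ : Int) => (-p.2, p.1))
        = (fun p _ => (fun q : Int × Int => (-q.2, q.1)) p) from rfl,
      foldl_const_iterate (fun q : Int × Int => (-q.2, q.1)) _ wp,
      PySem.List.length_pyRange_one, rotL_iter]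
    rw [show (wp : Int × Int) = (wp.1, wp.2) from rfl] at *
    rw [table_eq_rotR _ _ _ h0' h4']
    unfold D_move_ship at hnD
    by_cases hneg : number < 0
    · have hturns_neg : turns < 0 := by
        rw [hturns]; rw [show (number:Int) < 0 ↔ number ≤ -1 by omega] at hneg
        have := PySem.Int.floordiv_lt_iff_lt_mul (a:=number) (b:=90) (q:=0) (by norm_num)
        omega
      rw [show turns - 0 = turns by ring, Int.toNat_of_nonpos (by omega)]
      by_cases hm : t = 0
      · rw [hm]
        norm_num [PySem.Int.mod]
      · have hwp0 : wp = ((0 : Int), (0 : Int)) := by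
          by_contra hc
          exact hnD ⟨Or.inr rfl, hneg, hm, hc⟩
        have hx : wp.1 = 0 := by rw [hwp0]
        have hy : wp.2 = 0 := by rw [hwp0]
        rw [hx, hy]
        exact congrArg (fun z => (z, cx, cy)) (rotR_zero _).symm
    · have hturns_nn : 0 ≤ turns := by
        rw [hturns]
        have := PySem.Int.le_floordiv_iff_mul_le (a:=number) (b:=90) (q:=0) (by norm_num)
        omega
      rw [show turns - 0 = turns by ring]
      have hmodt : t = ((turns.toNat % 4 : Nat) : Int) := by
        rw [ht, PySem.Int.mod_eq_emod_of_pos (by norm_num)]; omega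
      have hmod' : PySem.Int.mod (-t) 4 = (((3 * turns.toNat) % 4 : Nat) : Int) := by
        rw [PySem.Int.mod_eq_emod_of_pos (by norm_num), hmodt]
        omega
      rw [hmod', Int.toNat_natCast, rotR_iterate_mod (3 * turns.toNat)]
  by_cases hF : command = "F"
  · subst hF
    simp [hget]
  · simp [hget, hE, hN, hS, hW, hR, hL, hF]

theorem move_ship_changed : Claim_changed_move_ship := by
  unfold Claim_changed_move_ship; decide

theorem move_ship_tight : Claim_exact_move_ship := by
  intro wp cx cy command number _ hD
  obtain ⟨hcmd, hneg, hmod, hwp⟩ := hD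
  unfold move_ship move_ship_alt
  have hturns_neg : PySem.Int.floordiv number 90 < 0 := by
    rw [show (number:Int) < 0 ↔ number ≤ -1 by omega] at hneg
    have := PySem.Int.floordiv_lt_iff_lt_mul (a:=number) (b:=90) (q:=0) (by norm_num)
    omega
  have hempty : PySem.List.pyRange 0 (PySem.Int.floordiv number 90) 1 = [] :=
    PySem.List.pyRange_one_eq_nil (by omega)
  set t := PySem.Int.mod (PySem.Int.floordiv number 90) 4 with ht
  have h0 : (0:Int) ≤ t := PySem.Int.mod_nonneg _ (by norm_num : (0:Int) < 4)
  have h4 : t < 4 := PySem.Int.mod_lt _ (by norm_num : (0:Int) < 4)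
  have hwp' : wp.1 ≠ 0 ∨ wp.2 ≠ 0 := by
    by_contra h
    push_neg at h
    exact hwp (Prod.ext h.1 h.2)
  rcases hcmd with hR | hL
  · subst hR
    have hget : PySem.Dict.get? pvDeltas "R" = none := by decide
    simp only [hget, hempty, String.reduceEq, if_false, or_false, ite_true, List.foldl_nil]
    intro hcontra
    have h1 := congrArg (fun r => r.1.1) hcontra
    have h2 := congrArg (fun r => r.1.2) hcontra
    simp only at h1 h2
    interval_cases t
    · exact hmod rfl
    · norm_num [PySem.List.pyGet?, PySem.List.pyIdx?, Int.toNat] at h1 h2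
      rcases hwp' with h | h <;> omega
    · norm_num [PySem.List.pyGet?, PySem.List.pyIdx?, Int.toNat] at h1 h2
      rcases hwp' with h | h <;> omega
    · norm_num [PySem.List.pyGet?, PySem.List.pyIdx?, Int.toNat] at h1 h2
      rcases hwp' with h | h <;> omega
  · subst hL
    have hget : PySem.Dict.get? pvDeltas "L" = none := by decide
    have h0' : (0:Int) ≤ PySem.Int.mod (-t) 4 := PySem.Int.mod_nonneg _ (by norm_num : (0:Int) < 4)
    have h4' : PySem.Int.mod (-t) 4 < 4 := PySem.Int.mod_lt _ (by norm_num : (0:Int) < 4)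
    have ht'ne : PySem.Int.mod (-t) 4 ≠ 0 := by
      rw [PySem.Int.mod_eq_emod_of_pos (by norm_num)]
      rw [PySem.Int.mod_eq_emod_of_pos (by norm_num)] at ht
      omega
    simp only [hget, hempty, String.reduceEq, if_false, or_true, ite_true, List.foldl_nil]
    intro hcontra
    have h1 := congrArg (fun r => r.1.1) hcontra
    have h2 := congrArg (fun r => r.1.2) hcontra
    simp only at h1 h2
    set t' := PySem.Int.mod (-t) 4 with ht'
    interval_cases t'
    · exact ht'ne rfl
    · norm_num [PySem.List.pyGet?, PySem.List.pyIdx?, Int.toNat] at h1 h2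
      rcases hwp' with h | h <;> omega
    · norm_num [PySem.List.pyGet?, PySem.List.pyIdx?, Int.toNat] at h1 h2
      rcases hwp' with h | h <;> omega
    · norm_num [PySem.List.pyGet?, PySem.List.pyIdx?, Int.toNat] at h1 h2
      rcases hwp' with h | h <;> omega
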